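-- pv_equiv track=rewrite | github.com/jpenzell/LocalLLM2 | LocalGPT.app/Contents/Resources/app.py | get_model_requirements
-- ===== SOURCE A (Python) =====
-- from typing import List, Dict, Optional
--
-- def get_model_requirements(model_name: str) -> Dict[str, any]:
--     """Get model requirements based on model name"""
--     # Default requirements for different model sizes
--     requirements = {
--         "tiny": {"min_ram": 4, "recommended_ram": 8},
--         "small": {"min_ram": 8, "recommended_ram": 16},
--         "medium": {"min_ram": 16, "recommended_ram": 32},
--         "large": {"min_ram": 32, "recommended_ram": 64}
--     }
--
--     # Determine model size category based on name
--     if any(x in model_name.lower() for x in ["tiny", "mini", "nano"]):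
--         return requirements["tiny"]
--     elif any(x in model_name.lower() for x in ["small", "7b"]):
--         return requirements["small"]
--     elif any(x in model_name.lower() for x in ["medium", "13b"]):
--         return requirements["medium"]
--     elif any(x in model_name.lower() for x in ["large", "33b", "65b", "70b"]):
--         return requirements["large"]
--     else:
--         return requirements["medium"]  # Default to medium requirements
-- ===== SOURCE B (Python) =====
-- # Exhaustive min-rank scan: instead of an ordered first-match branch chain,
-- # score every keyword found in the name by its size rank and take the minimum
-- # (default: medium). Correct because A's chain picks the lowest-ranked
-- # matching category, and within a category any keyword match suffices.
--
-- _SIZES = ("tiny", "small", "medium", "large")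
-- _REQS = {
--     "tiny": {"min_ram": 4, "recommended_ram": 8},
--     "small": {"min_ram": 8, "recommended_ram": 16},
--     "medium": {"min_ram": 16, "recommended_ram": 32},
--     "large": {"min_ram": 32, "recommended_ram": 64},
-- }
-- _KEYWORD_RANK = {
--     "tiny": 0, "mini": 0, "nano": 0,
--     "small": 1, "7b": 1,
--     "medium": 2, "13b": 2,
--     "large": 3, "33b": 3, "65b": 3, "70b": 3,
-- }
--
-- def get_model_requirements(model_name: str):
--     """Get model requirements based on model name"""
--     name = model_name.lower()
--     best = min((r for k, r in _KEYWORD_RANK.items() if k in name), default=2)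
--     return _REQS[_SIZES[best]]
-- ===== Notes on version B (the rewrite author's own statement) =====
-- stated objective: alternative
-- what changed: Replaced the ordered if/elif first-match chain (rebuilding the dicts each call) by an exhaustive scan of a flat keyword-to-rank map taking the minimum rank found (default medium), then one table lookup.
import Mathlib
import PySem

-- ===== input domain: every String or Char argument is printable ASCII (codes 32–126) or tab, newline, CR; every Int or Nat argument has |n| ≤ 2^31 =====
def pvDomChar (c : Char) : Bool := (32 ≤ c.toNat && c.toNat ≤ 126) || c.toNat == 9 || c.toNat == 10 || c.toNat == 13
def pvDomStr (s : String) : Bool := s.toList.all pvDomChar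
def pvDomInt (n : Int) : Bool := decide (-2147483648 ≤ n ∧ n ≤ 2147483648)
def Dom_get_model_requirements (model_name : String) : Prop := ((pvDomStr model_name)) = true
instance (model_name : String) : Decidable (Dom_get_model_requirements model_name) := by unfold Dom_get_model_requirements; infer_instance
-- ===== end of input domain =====

-- B replaces A's ordered if/elif first-match chain by an exhaustive min-rank scan over a
-- flat keyword-to-rank map (objective: alternative). Equivalence is about the RETURN value;
-- Python object identity/sharing is outside the model.

-- ===== PORT A =====
def get_model_requirements (model_name : String) : List (String × Int) :=
  let requirements : PySem.Dict String (List (String × Int)) := PySem.Dict.ofList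
    [("tiny",   [("min_ram", 4),  ("recommended_ram", 8)]),
     ("small",  [("min_ram", 8),  ("recommended_ram", 16)]),
     ("medium", [("min_ram", 16), ("recommended_ram", 32)]),
     ("large",  [("min_ram", 32), ("recommended_ram", 64)])]
  if ["tiny", "mini", "nano"].any (fun x => PySem.Str.isIn x (PySem.Str.lower model_name)) then
    PySem.Dict.getD requirements "tiny" []
  else if ["small", "7b"].any (fun x => PySem.Str.isIn x (PySem.Str.lower model_name)) then
    PySem.Dict.getD requirements "small" []
  else if ["medium", "13b"].any (fun x => PySem.Str.isIn x (PySem.Str.lower model_name)) then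
    PySem.Dict.getD requirements "medium" []
  else if ["large", "33b", "65b", "70b"].any (fun x => PySem.Str.isIn x (PySem.Str.lower model_name)) then
    PySem.Dict.getD requirements "large" []
  else
    PySem.Dict.getD requirements "medium" []

-- ===== PORT B =====
def pvSizes : List String := ["tiny", "small", "medium", "large"]

def pvReqs : PySem.Dict String (List (String × Int)) := PySem.Dict.ofList
  [("tiny",   [("min_ram", 4),  ("recommended_ram", 8)]),
   ("small",  [("min_ram", 8),  ("recommended_ram", 16)]),
   ("medium", [("min_ram", 16), ("recommended_ram", 32)]),
   ("large",  [("min_ram", 32), ("recommended_ram", 64)])]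

def pvKeywordRank : List (String × Int) :=
  [("tiny", 0), ("mini", 0), ("nano", 0),
   ("small", 1), ("7b", 1),
   ("medium", 2), ("13b", 2),
   ("large", 3), ("33b", 3), ("65b", 3), ("70b", 3)]

-- best = min((r for k, r in _KEYWORD_RANK.items() if k in name), default=2)
def pvBestRank (name : String) : Int :=
  match PySem.List.min?
      ((pvKeywordRank.filter (fun kr => PySem.Str.isIn kr.1 name)).map (fun kr => kr.2))
      (fun r => r) with
  | some m => m
  | none => 2

def get_model_requirements_alt (model_name : String) : List (String × Int) :=
  PySem.Dict.getD pvReqs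
    ((PySem.List.pyGet? pvSizes (pvBestRank (PySem.Str.lower model_name))).getD "") []

-- ===== PRECONDITION & SPEC =====
def Spec_get_model_requirements (model_name : String) (out : List (String × Int)) : Prop := out = get_model_requirements_alt model_name
instance (model_name : String) (out : List (String × Int)) : Decidable (Spec_get_model_requirements model_name out) := by unfold Spec_get_model_requirements; infer_instance

-- ===== CLAIM =====
def Claim_equal_get_model_requirements : Prop := ∀ (model_name : String), Dom_get_model_requirements model_name → Spec_get_model_requirements model_name (get_model_requirements model_name)

-- ===== LEMMAS AND PROOFS =====

-- the "min with default" of a list that contains r and is bounded below by r is r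
theorem pv_min_eq (xs : List Int) (d r : Int) (hmem : r ∈ xs) (hlb : ∀ x ∈ xs, r ≤ x) :
    (match PySem.List.min? xs (fun x => x) with | some m => m | none => d) = r := by
  cases hm : PySem.List.min? xs (fun x => x) with
  | none =>
      rw [PySem.List.min?_eq_none_iff] at hm
      subst hm; cases hmem
  | some m =>
      have h1 : r ≤ m := hlb m (PySem.List.min?_mem hm)
      have h2 : m ≤ r := PySem.List.min?_isMin hm r hmem
      simpa using le_antisymm h2 h1

-- the selected rank is in the filtered rank list as soon as its keyword matches
theorem pv_rank_mem (name kw : String) (r : Int)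
    (hk : (kw, r) ∈ pvKeywordRank) (h : PySem.Str.isIn kw name = true) :
    r ∈ (pvKeywordRank.filter (fun kr => PySem.Str.isIn kr.1 name)).map (fun kr => kr.2) :=
  List.mem_map.mpr ⟨(kw, r), List.mem_filter.mpr ⟨hk, h⟩, rfl⟩

-- a pointwise bound on matching keywords bounds the filtered rank list
theorem pv_rank_lb (name : String) (r : Int)
    (h : ∀ kr ∈ pvKeywordRank, PySem.Str.isIn kr.1 name = true → r ≤ kr.2) :
    ∀ x ∈ (pvKeywordRank.filter (fun kr => PySem.Str.isIn kr.1 name)).map (fun kr => kr.2), r ≤ x := by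
  intro x hx
  obtain ⟨kr, hf, rfl⟩ := List.mem_map.mp hx
  obtain ⟨hkr, hp⟩ := List.mem_filter.mp hf
  exact h kr hkr hp

-- ===== VERDICT =====
set_option maxHeartbeats 1600000 in
theorem get_model_requirements_spec : Claim_equal_get_model_requirements := by
  intro s _
  unfold Spec_get_model_requirements get_model_requirements get_model_requirements_alt
  by_cases h1 : ["tiny", "mini", "nano"].any (fun x => PySem.Str.isIn x (PySem.Str.lower s)) = true
  · rw [if_pos h1]
    simp only [List.any_cons, List.any_nil, Bool.or_false, Bool.or_eq_true] at h1
    have hbest : pvBestRank (PySem.Str.lower s) = 0 := by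
      unfold pvBestRank
      have hlb := pv_rank_lb (PySem.Str.lower s) 0 (by intro kr hkr _; fin_cases hkr <;> norm_num)
      rcases h1 with h | h | h
      · exact pv_min_eq _ _ _ (pv_rank_mem _ "tiny" 0 (by decide) h) hlb
      · exact pv_min_eq _ _ _ (pv_rank_mem _ "mini" 0 (by decide) h) hlb
      · exact pv_min_eq _ _ _ (pv_rank_mem _ "nano" 0 (by decide) h) hlb
    rw [hbest]; decide
  · rw [if_neg h1]
    simp only [List.any_cons, List.any_nil, Bool.or_false, Bool.or_eq_true, not_or,
      Bool.not_eq_true] at h1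
    obtain ⟨f1, f2, f3⟩ := h1
    by_cases h2 : ["small", "7b"].any (fun x => PySem.Str.isIn x (PySem.Str.lower s)) = true
    · rw [if_pos h2]
      simp only [List.any_cons, List.any_nil, Bool.or_false, Bool.or_eq_true] at h2
      have hbest : pvBestRank (PySem.Str.lower s) = 1 := by
        unfold pvBestRank
        have hlb := pv_rank_lb (PySem.Str.lower s) 1
          (by intro kr hkr hin; fin_cases hkr <;> first | omega | simp_all)
        rcases h2 with h | h
        · exact pv_min_eq _ _ _ (pv_rank_mem _ "small" 1 (by decide) h) hlb
        · exact pv_min_eq _ _ _ (pv_rank_mem _ "7b" 1 (by decide) h) hlb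
      rw [hbest]; decide
    · rw [if_neg h2]
      simp only [List.any_cons, List.any_nil, Bool.or_false, Bool.or_eq_true, not_or,
        Bool.not_eq_true] at h2
      obtain ⟨f4, f5⟩ := h2
      by_cases h3 : ["medium", "13b"].any (fun x => PySem.Str.isIn x (PySem.Str.lower s)) = true
      · rw [if_pos h3]
        simp only [List.any_cons, List.any_nil, Bool.or_false, Bool.or_eq_true] at h3
        have hbest : pvBestRank (PySem.Str.lower s) = 2 := by
          unfold pvBestRank
          have hlb := pv_rank_lb (PySem.Str.lower s) 2
            (by intro kr hkr hin; fin_cases hkr <;> first | omega | simp_all)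
          rcases h3 with h | h
          · exact pv_min_eq _ _ _ (pv_rank_mem _ "medium" 2 (by decide) h) hlb
          · exact pv_min_eq _ _ _ (pv_rank_mem _ "13b" 2 (by decide) h) hlb
        rw [hbest]; decide
      · rw [if_neg h3]
        simp only [List.any_cons, List.any_nil, Bool.or_false, Bool.or_eq_true, not_or,
          Bool.not_eq_true] at h3
        obtain ⟨f6, f7⟩ := h3
        by_cases h4 : ["large", "33b", "65b", "70b"].any (fun x => PySem.Str.isIn x (PySem.Str.lower s)) = true
        · rw [if_pos h4]
          simp only [List.any_cons, List.any_nil, Bool.or_false, Bool.or_eq_true] at h4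
          have hbest : pvBestRank (PySem.Str.lower s) = 3 := by
            unfold pvBestRank
            have hlb := pv_rank_lb (PySem.Str.lower s) 3
              (by intro kr hkr hin; fin_cases hkr <;> first | omega | simp_all)
            rcases h4 with h | h | h | h
            · exact pv_min_eq _ _ _ (pv_rank_mem _ "large" 3 (by decide) h) hlb
            · exact pv_min_eq _ _ _ (pv_rank_mem _ "33b" 3 (by decide) h) hlb
            · exact pv_min_eq _ _ _ (pv_rank_mem _ "65b" 3 (by decide) h) hlb
            · exact pv_min_eq _ _ _ (pv_rank_mem _ "70b" 3 (by decide) h) hlb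
          rw [hbest]; decide
        · rw [if_neg h4]
          simp only [List.any_cons, List.any_nil, Bool.or_false, Bool.or_eq_true, not_or,
            Bool.not_eq_true] at h4
          obtain ⟨f8, f9, f10, f11⟩ := h4
          have hbest : pvBestRank (PySem.Str.lower s) = 2 := by
            unfold pvBestRank
            have hnil : pvKeywordRank.filter (fun kr => PySem.Str.isIn kr.1 (PySem.Str.lower s)) = [] := by
              rw [List.filter_eq_nil_iff]
              intro kr hkr
              fin_cases hkr <;> simp_all
            rw [hnil]; decide
          rw [hbest]; decide
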